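-- pv_equiv track=rewrite | github.com/darer49/test3 | book/dataFilter.py | shakeoff_filter
-- ===== SOURCE A (Python) =====
-- def shakeoff_filter(arr, limit):  # limit代表计数器上限
--     shake_value = arr[0]  # 当前有效值取第一个样本值
--     shake_num = 0  # 计数器值，初始化为0
--     for i, v in enumerate(arr):  # 对arr遍历，i代表从0开始的数组下标，v代表值
--         if v != shake_value:  # 如果当前值与当前有效值不一致
--             shake_num += 1
--             if shake_num >= limit:  # 当计数器达到上限
--                 arr[i] = shake_value
--                 shake_num = 0
--     return arr
-- ===== SOURCE B (Python) =====
-- def shakeoff_filter(arr, limit):  # limit代表计数器上限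
--     shake_value = arr[0]
--     mism = [i for i, v in enumerate(arr) if v != shake_value]
--     step = limit if limit > 1 else 1
--     for k, i in enumerate(mism):
--         if k % step == step - 1:
--             arr[i] = shake_value
--     return arr
-- ===== Notes on version B (the rewrite author's own statement) =====
-- stated objective: alternative
-- what changed: Replaces the running mismatch counter with reset by first collecting the list of mismatch positions and then clamping every step-th one (step = max(limit,1)) selected by ordinal modulus.
import Mathlib
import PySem

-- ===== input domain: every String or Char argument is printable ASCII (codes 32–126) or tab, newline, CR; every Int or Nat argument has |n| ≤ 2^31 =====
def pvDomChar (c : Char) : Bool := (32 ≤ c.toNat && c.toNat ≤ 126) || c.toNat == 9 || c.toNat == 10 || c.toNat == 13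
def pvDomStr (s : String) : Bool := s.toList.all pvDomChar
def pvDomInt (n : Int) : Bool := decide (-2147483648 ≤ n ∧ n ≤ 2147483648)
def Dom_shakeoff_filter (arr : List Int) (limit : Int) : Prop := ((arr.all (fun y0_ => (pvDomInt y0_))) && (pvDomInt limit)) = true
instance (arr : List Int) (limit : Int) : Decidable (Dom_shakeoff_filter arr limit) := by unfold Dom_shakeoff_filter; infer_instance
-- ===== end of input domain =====

-- B replaces A's running mismatch counter (with reset) by collecting the mismatch
-- positions first and clamping every step-th one (step = max(limit,1)) by ordinal
-- modulus; same cost, different decomposition. Both A and B mutate arr in place in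
-- Python the same way (assigning shake_value at the same indices); the equivalence
-- proved here is about the returned list.

-- ===== PORT A =====
def shakeoff_filter (arr : List Int) (limit : Int) : List Int :=
  -- shake_value = arr[0]  (arr ≠ [] by Pre_; Python raises IndexError on [])
  let shake_value := PySem.List.pyGetD arr 0 0
  -- for i, v in enumerate(arr): …  carrying state (arr, shake_num)
  (((PySem.List.enumerate arr).foldl
    (fun (s : List Int × Int) (iv : Int × Int) =>
      if iv.2 ≠ shake_value then
        if s.2 + 1 ≥ limit then (PySem.List.pySetD s.1 iv.1 shake_value, 0)
        else (s.1, s.2 + 1)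
      else s)
    (arr, 0)).1)

-- ===== PORT B =====
def shakeoff_filter_alt (arr : List Int) (limit : Int) : List Int :=
  -- shake_value = arr[0]  (arr ≠ [] by Pre_)
  let shake_value := PySem.List.pyGetD arr 0 0
  -- mism = [i for i, v in enumerate(arr) if v != shake_value]
  let mism := (PySem.List.enumerate arr).filterMap
    (fun iv => if iv.2 ≠ shake_value then some iv.1 else none)
  -- step = limit if limit > 1 else 1
  let step := if limit > 1 then limit else 1
  -- for k, i in enumerate(mism): if k % step == step - 1: arr[i] = shake_value
  (PySem.List.enumerate mism).foldl
    (fun a ki => if PySem.Int.mod ki.1 step = step - 1 then PySem.List.pySetD a ki.2 shake_value else a)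
    arr

-- ===== PRECONDITION & SPEC =====
-- Pre_ excludes only the empty list, on which A (and B) raise IndexError at arr[0].
def Pre_shakeoff_filter (arr : List Int) (limit : Int) : Prop := arr ≠ []
instance (arr : List Int) (limit : Int) : Decidable (Pre_shakeoff_filter arr limit) := by unfold Pre_shakeoff_filter; infer_instance
def pvWitness_shakeoff_filter : List Int × Int := ([1, 2, 2, 1, 3, 3], 2)

def Spec_shakeoff_filter (arr : List Int) (limit : Int) (out : List Int) : Prop := out = shakeoff_filter_alt arr limit
instance (arr : List Int) (limit : Int) (out : List Int) : Decidable (Spec_shakeoff_filter arr limit out) := by unfold Spec_shakeoff_filter; infer_instance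

-- ===== CLAIM (what is proved, stated in full; the proofs are below) =====
def Claim_equal_shakeoff_filter : Prop := ∀ (arr : List Int) (limit : Int), Dom_shakeoff_filter arr limit → Pre_shakeoff_filter arr limit → Spec_shakeoff_filter arr limit (shakeoff_filter arr limit)

-- ===== LEMMAS AND PROOFS =====

-- For a positive divisor, Python's % is Lean's emod.
theorem pv_mod_pos (a b : Int) (hb : 0 < b) : PySem.Int.mod a b = a % b := by
  simp [PySem.Int.mod, Int.fmod_eq_emod_of_nonneg _ (le_of_lt hb)]

-- The heart: A's counter loop over a suffix l (with counter cnt % step, where cnt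
-- mismatches were already consumed) equals B's ordinal-modulus pass over the
-- mismatch indices of l, enumerated from cnt.
theorem pv_main (sv lim : Int) (l : List (Int × Int)) :
    ∀ (a : List Int) (cnt : Int), 0 ≤ cnt →
    (l.foldl
      (fun (s : List Int × Int) (iv : Int × Int) =>
        if iv.2 ≠ sv then
          if s.2 + 1 ≥ lim then (PySem.List.pySetD s.1 iv.1 sv, 0)
          else (s.1, s.2 + 1)
        else s)
      (a, cnt % (if lim > 1 then lim else 1))).1
    = (PySem.List.enumerate (l.filterMap
         (fun iv => if iv.2 ≠ sv then some iv.1 else none)) cnt).foldl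
        (fun a ki => if PySem.Int.mod ki.1 (if lim > 1 then lim else 1) = (if lim > 1 then lim else 1) - 1
                     then PySem.List.pySetD a ki.2 sv else a)
        a := by
  set step : Int := if lim > 1 then lim else 1 with hstep
  have hpos : 0 < step := by rw [hstep]; split <;> omega
  induction l with
  | nil => intro a cnt _; simp
  | cons hd tl ih =>
    intro a cnt hcnt
    have hmlt : cnt % step < step := Int.emod_lt_of_pos cnt hpos
    have hmge : 0 ≤ cnt % step := Int.emod_nonneg cnt (by omega)
    have hmod : PySem.Int.mod cnt step = cnt % step := pv_mod_pos cnt step hpos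
    have hsplit : cnt % step + step * (cnt / step) = cnt := Int.emod_add_mul_ediv cnt step
    rw [List.foldl_cons, List.filterMap_cons]
    by_cases hv : hd.2 ≠ sv
    · -- a mismatch: A increments (and maybe clamps), B consumes ordinal cnt
      have hiff : (cnt % step + 1 ≥ lim) ↔ (cnt % step = step - 1) := by
        rw [hstep] at *
        by_cases h1 : lim > 1 <;> simp [h1] at hmlt hmge ⊢ <;> omega
      simp only [if_pos hv, PySem.List.enumerate_cons, List.foldl_cons, hmod]
      by_cases hcl : cnt % step = step - 1
      · -- clamp: both set index hd.1; A resets to 0 = (cnt+1) % step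
        have h0 : (cnt + 1) % step = 0 := by
          have e : cnt + 1 = step * (cnt / step + 1) := by
            rw [Int.mul_add, Int.mul_one]; linarith
          rw [e]; exact Int.mul_emod_right _ _
        rw [if_pos (hiff.mpr hcl), if_pos hcl]
        have H := ih (PySem.List.pySetD a hd.1 sv) (cnt + 1) (by omega)
        rw [h0] at H; exact H
      · have h1 : (cnt + 1) % step = cnt % step + 1 := by
          have e : cnt + 1 = cnt % step + 1 + cnt / step * step := by linarith
          rw [e, Int.add_mul_emod_self_right, Int.emod_eq_of_lt (by omega) (by omega)]
        rw [if_neg (fun h => hcl (hiff.mp h)), if_neg hcl]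
        have H := ih a (cnt + 1) (by omega)
        rw [h1] at H; exact H
    · -- a match: both skip; B's ordinal stays cnt
      rw [if_neg hv, if_neg hv]
      exact ih a cnt hcnt

-- ===== VERDICT (by name: the statement is the Claim_ definition above) =====
theorem shakeoff_filter_spec : Claim_equal_shakeoff_filter := by
  intro arr limit _ _
  unfold Spec_shakeoff_filter shakeoff_filter shakeoff_filter_alt
  have h := pv_main (PySem.List.pyGetD arr 0 0) limit (PySem.List.enumerate arr) arr 0 le_rfl
  simpa using h
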